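-- pv_equiv track=rewrite | github.com/hwahyeon/solved-algorithms | Python/Codewars | Maximum Depth of Nested Brackets.py | strings_in_max_depth
-- ===== SOURCE A (Python) =====
-- def strings_in_max_depth(S):
--     def str_to_lst(Str):
--         lst = list(Str)
--         SUM = 0
--         for i, l in zip(lst, range(len(lst))):
--             if i == '(':
--                 SUM += 1
--                 lst[l] = SUM
--             elif i == ')':
--                 lst[l] = SUM
--                 SUM -= 1
--             else:
--                 pass
--         return lst
--
--     def MAX_value(lst):
--         max_lst = []
--         for i in lst:
--             if str(type(i)) == "<class 'int'>":
--                 max_lst.append(i)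
--         return max(max_lst)
--
--     def Locate(lst, max_num):
--         loc = []
--         num = 0
--         for i in lst:
--             num += 1
--             if i == max_num:
--                 loc.append(num)
--             else:
--                 pass
--         return loc
--
--     def res_let(locate,S):
--         noo = 0
--         res_lst = []
--         for i in range(int(len(locate)/2)):
--             res_lst.append(S[locate[noo]:locate[noo + 1] - 1])
--             noo += 2
--         return res_lst
--
--
--     res_lst2 = []
--     if S.find('(') != -1:
--         return res_let(Locate(str_to_lst(S), MAX_value(str_to_lst(S))),S)
--     else:
--         res_lst2.append(S)
--         return res_lst2
-- ===== SOURCE B (Python) =====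
-- def strings_in_max_depth(S):
--     if '(' not in S:
--         return [S]
--     # pass 1: maximum bracket depth (depth after '(' increments, before ')' decrements)
--     depth = 0
--     maxd = None
--     for c in S:
--         if c == '(':
--             depth += 1
--             maxd = depth if maxd is None else max(maxd, depth)
--         elif c == ')':
--             maxd = depth if maxd is None else max(maxd, depth)
--             depth -= 1
--     # pass 2: stream out the text between consecutive max-depth brackets
--     res = []
--     depth = 0
--     buf = None  # None = not collecting; list of collected chars otherwise
--     for c in S:
--         if c == '(':
--             depth += 1
--             d = depth
--         elif c == ')':
--             d = depth
--             depth -= 1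
--         else:
--             if buf is not None:
--                 buf.append(c)
--             continue
--         if d == maxd:
--             if buf is None:
--                 buf = []
--             else:
--                 res.append(''.join(buf))
--                 buf = None
--         elif buf is not None:
--             buf.append(c)
--     return res
-- ===== Notes on version B (the rewrite author's own statement) =====
-- stated objective: alternative
-- what changed: A labels every bracket with its depth, rescans for the maximum, collects 1-based positions and slices S between paired positions; B never builds positions or slices: one pass computes the max depth with a running counter, a second streaming pass toggles a character buffer at max-depth brackets and emits the buffered text directly.
import Mathlib
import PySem

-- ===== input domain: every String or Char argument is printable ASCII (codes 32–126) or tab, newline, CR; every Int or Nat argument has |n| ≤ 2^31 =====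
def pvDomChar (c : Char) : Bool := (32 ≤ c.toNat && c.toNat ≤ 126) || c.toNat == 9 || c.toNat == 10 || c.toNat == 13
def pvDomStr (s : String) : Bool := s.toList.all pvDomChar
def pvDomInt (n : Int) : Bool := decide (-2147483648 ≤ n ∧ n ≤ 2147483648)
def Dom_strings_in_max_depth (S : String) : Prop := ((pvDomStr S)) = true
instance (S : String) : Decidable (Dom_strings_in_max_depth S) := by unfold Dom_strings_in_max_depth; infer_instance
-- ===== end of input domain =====

-- B drops A's whole position machinery (depth-labelled list built twice, max rescan,
-- position collection, slicing): one counter pass finds the max depth, then a streaming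
-- pass toggles a char buffer at max-depth brackets and emits the buffered text directly;
-- objective: alternative (same O(n) cost, different data flow).

-- ===== PORT A =====
-- builtin max over a non-empty int list (A's MAX_value calls max)
def pvPyMax : List Int → Int
  | [] => 0          -- Python max raises on []; never reached (called only when '(' occurs)
  | x :: xs => xs.foldl max x

-- str_to_lst: the list of S with '(' replaced by SUM after increment, ')' by SUM before decrement
def pvStrToLst : List Char → Int → List (Char ⊕ Int)
  | [], _ => []
  | c :: rest, sum =>
    if c = '(' then Sum.inr (sum + 1) :: pvStrToLst rest (sum + 1)
    else if c = ')' then Sum.inr sum :: pvStrToLst rest (sum - 1)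
    else Sum.inl c :: pvStrToLst rest sum

-- MAX_value: collect the int entries, take max
def pvMaxValue (lst : List (Char ⊕ Int)) : Int :=
  pvPyMax (lst.filterMap (fun x => match x with | Sum.inl _ => none | Sum.inr n => some n))

-- Locate: 1-based positions of entries equal to max_num (a char entry never equals an int)
def pvLocate : List (Char ⊕ Int) → Int → Int → List Int
  | [], _, _ => []
  | x :: rest, m, num =>
    match x with
    | Sum.inl _ => pvLocate rest m (num + 1)
    | Sum.inr n => if n = m then (num + 1) :: pvLocate rest m (num + 1)
                   else pvLocate rest m (num + 1)

-- res_let: pair up consecutive positions, slice S[a : b-1]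
def pvResLet : List Int → String → List String
  | a :: b :: rest, S => PySem.Str.slice S (some a) (some (b - 1)) :: pvResLet rest S
  | _, _ => []

def strings_in_max_depth (S : String) : List String :=
  if PySem.Str.find S "(" ≠ -1 then
    pvResLet (pvLocate (pvStrToLst S.toList 0) (pvMaxValue (pvStrToLst S.toList 0)) 0) S
  else [S]

-- ===== PORT B =====
-- maxd = depth if maxd is None else max(maxd, depth)
def pvOptMax (m : Option Int) (d : Int) : Int :=
  match m with | none => d | some v => max v d

-- pass 1: running depth counter, maximum depth seen at any bracket
def pvMaxD : List Char → Int → Option Int → Option Int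
  | [], _, m => m
  | c :: rest, depth, m =>
    if c = '(' then pvMaxD rest (depth + 1) (some (pvOptMax m (depth + 1)))
    else if c = ')' then pvMaxD rest (depth - 1) (some (pvOptMax m depth))
    else pvMaxD rest depth m

-- pass 2: buf = none (not collecting) / some chars; toggle at max-depth brackets, emit on close
def pvStream : List Char → Int → Option (List Char) → Int → List String
  | [], _, _, _ => []
  | c :: rest, depth, buf, maxd =>
    if c = '(' then
      if depth + 1 = maxd then
        match buf with
        | none => pvStream rest (depth + 1) (some []) maxd
        | some b => String.ofList b :: pvStream rest (depth + 1) none maxd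
      else
        match buf with
        | some b => pvStream rest (depth + 1) (some (b ++ [c])) maxd
        | none => pvStream rest (depth + 1) none maxd
    else if c = ')' then
      if depth = maxd then
        match buf with
        | none => pvStream rest (depth - 1) (some []) maxd
        | some b => String.ofList b :: pvStream rest (depth - 1) none maxd
      else
        match buf with
        | some b => pvStream rest (depth - 1) (some (b ++ [c])) maxd
        | none => pvStream rest (depth - 1) none maxd
    else
      match buf with
      | some b => pvStream rest depth (some (b ++ [c])) maxd
      | none => pvStream rest depth none maxd

def strings_in_max_depth_alt (S : String) : List String :=
  if PySem.Str.isIn "(" S = false then [S]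
  else
    match pvMaxD S.toList 0 none with
    | none => []   -- Python: maxd stays None, `d == maxd` never true, res = []; unreachable under the guard
    | some maxd => pvStream S.toList 0 none maxd

-- ===== PRECONDITION & SPEC =====
def Spec_strings_in_max_depth (S : String) (out : List String) : Prop := out = strings_in_max_depth_alt S
instance (S : String) (out : List String) : Decidable (Spec_strings_in_max_depth S out) := by unfold Spec_strings_in_max_depth; infer_instance

-- ===== CLAIM (what is proved, stated in full; the proofs are below) =====
def Claim_equal_strings_in_max_depth : Prop := ∀ (S : String), Dom_strings_in_max_depth S → Spec_strings_in_max_depth S (strings_in_max_depth S)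

-- ===== LEMMAS AND PROOFS =====

-- proof-side helper: (1-based position, depth) of every bracket of cs, starting at index i
def pvMarks : List Char → Int → Int → List (Int × Int)
  | [], _, _ => []
  | c :: rest, i, depth =>
    if c = '(' then (i + 1, depth + 1) :: pvMarks rest (i + 1) (depth + 1)
    else if c = ')' then (i + 1, depth) :: pvMarks rest (i + 1) (depth - 1)
    else pvMarks rest (i + 1) depth

-- A's int entries, in order, are exactly the bracket depths
theorem pvInts_eq_marks_snd (cs : List Char) (s i : Int) :
    (pvStrToLst cs s).filterMap (fun x => match x with | Sum.inl _ => none | Sum.inr n => some n)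
      = (pvMarks cs i s).map (·.2) := by
  induction cs generalizing s i with
  | nil => rfl
  | cons c rest ih =>
    by_cases h1 : c = '(' <;> by_cases h2 : c = ')' <;>
      (simp [pvStrToLst, pvMarks, h1, h2]; exact ih _ _)

-- A's Locate over str_to_lst equals the positions of the max-depth brackets
theorem pvLocate_eq_filter (cs : List Char) (m s i : Int) :
    pvLocate (pvStrToLst cs s) m i
      = ((pvMarks cs i s).filter (fun pd => pd.2 == m)).map (·.1) := by
  induction cs generalizing s i with
  | nil => rfl
  | cons c rest ih =>
    by_cases h1 : c = '('
    · by_cases h3 : s + 1 = m <;>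
        simp [pvStrToLst, pvMarks, pvLocate, h1, h3, ih]
    · by_cases h2 : c = ')'
      · by_cases h3 : s = m <;>
          simp [pvStrToLst, pvMarks, pvLocate, h2, h3, ih]
      · simp [pvStrToLst, pvMarks, pvLocate, h1, h2, ih]

-- pvMaxD is the optional-max fold over the bracket depths
theorem pvMaxD_eq_fold (cs : List Char) (depth i : Int) (m : Option Int) :
    pvMaxD cs depth m
      = ((pvMarks cs i depth).map (·.2)).foldl (fun acc d => some (pvOptMax acc d)) m := by
  induction cs generalizing depth i m with
  | nil => rfl
  | cons c rest ih =>
    by_cases h1 : c = '(' <;> by_cases h2 : c = ')' <;>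
      (simp [pvMaxD, pvMarks, h1, h2]; exact ih _ _ _)

theorem fold_optMax (l : List Int) (x : Int) :
    l.foldl (fun acc d => some (pvOptMax acc d)) (some x) = some (l.foldl max x) := by
  induction l generalizing x with
  | nil => rfl
  | cons y ys ih =>
    rw [List.foldl_cons, List.foldl_cons]
    exact ih (max x y)

theorem pvMarks_ne_nil (cs : List Char) (i depth : Int) (h : '(' ∈ cs) :
    pvMarks cs i depth ≠ [] := by
  induction cs generalizing i depth with
  | nil => simp at h
  | cons c rest ih =>
    by_cases h1 : c = '('
    · simp [pvMarks, h1]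
    · by_cases h2 : c = ')'
      · simp [pvMarks, h2]
      · simp [pvMarks, h1, h2]
        rcases List.mem_cons.mp h with hh | hh
        · exact absurd hh.symm h1
        · exact ih _ _ hh

-- take one more char: append the char at the boundary
theorem take_snoc (L : List Char) (p i : Nat) (c : Char)
    (hpi : p ≤ i) (hc : L[i]? = some c) :
    (L.drop p).take (i - p) ++ [c] = (L.drop p).take (i + 1 - p) := by
  have h1 : i + 1 - p = (i - p) + 1 := by omega
  have h2 : (L.drop p)[i - p]? = some c := by
    rw [List.getElem?_drop]
    rwa [show p + (i - p) = i by omega]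
  rw [h1, List.take_add_one, h2]
  rfl

theorem slice_eq_take_drop (S : String) (p i : Nat) :
    PySem.Str.slice S (some (p : Int)) (some (i : Int))
      = String.ofList ((S.toList.drop p).take (i - p)) := by
  apply String.toList_inj.mp
  rw [PySem.Str.toList_slice]
  simp
  rw [PySem.List.slice_natCast]

-- MAIN: streaming extraction equals A's slice pairing.
-- st = some p means: collecting since the bracket at 1-based position p (chars p..i-1 buffered).
theorem pvStream_spec (S : String) (maxd : Int) :
    ∀ (cs : List Char) (i : Nat) (depth : Int) (st : Option Nat),
      cs = S.toList.drop i →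
      (∀ p, st = some p → p ≤ i) →
      pvStream cs depth (st.map (fun p => (S.toList.drop p).take (i - p))) maxd
        = pvResLet ((st.map (fun p => (p : Int))).toList
            ++ ((pvMarks cs (i : Int) depth).filter (fun pd => pd.2 == maxd)).map (·.1)) S := by
  intro cs
  induction cs with
  | nil =>
    intro i depth st _ _
    cases st with
    | none => rfl
    | some p => rfl
  | cons c rest ih =>
    intro i depth st hcs hst
    have hc : S.toList[i]? = some c := by
      have := congrArg (·[0]?) hcs
      simpa [List.getElem?_drop] using this.symm
    have hrest : rest = S.toList.drop (i + 1) := by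
      have := congrArg List.tail hcs
      simpa [List.tail_drop] using this
    by_cases h1 : c = '('
    · subst h1
      by_cases h3 : depth + 1 = maxd
      · -- max-depth '(' : toggle the buffer
        cases st with
        | none =>
          have := ih (i + 1) (depth + 1) (some (i + 1)) hrest (by intro p hp; cases hp; omega)
          rw [h3] at this
          simp [pvStream, pvMarks, h3]
          simpa using this
        | some p =>
          have hpi := hst p rfl
          have := ih (i + 1) (depth + 1) none hrest (by intro p hp; cases hp)
          rw [h3] at this
          simp [pvStream, pvMarks, h3, pvResLet]
          constructor
          · exact (slice_eq_take_drop S p i).symm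
          · simpa using this
      · -- '(' below max depth
        cases st with
        | none =>
          have := ih (i + 1) (depth + 1) none hrest (by intro p hp; cases hp)
          simp [pvStream, pvMarks, h3]
          simpa using this
        | some p =>
          have hpi := hst p rfl
          have := ih (i + 1) (depth + 1) (some p) hrest (by intro q hq; cases hq; omega)
          simp [pvStream, pvMarks, h3, take_snoc S.toList p i '(' hpi hc]
          simpa using this
    · by_cases h2 : c = ')'
      · subst h2
        by_cases h3 : depth = maxd
        · cases st with
          | none =>
            have := ih (i + 1) (depth - 1) (some (i + 1)) hrest (by intro p hp; cases hp; omega)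
            rw [h3] at this
            simp [pvStream, pvMarks, h3]
            simpa using this
          | some p =>
            have hpi := hst p rfl
            have := ih (i + 1) (depth - 1) none hrest (by intro p hp; cases hp)
            rw [h3] at this
            simp [pvStream, pvMarks, h3, pvResLet]
            constructor
            · exact (slice_eq_take_drop S p i).symm
            · simpa using this
        · cases st with
          | none =>
            have := ih (i + 1) (depth - 1) none hrest (by intro p hp; cases hp)
            simp [pvStream, pvMarks, h3]
            simpa using this
          | some p =>
            have hpi := hst p rfl
            have := ih (i + 1) (depth - 1) (some p) hrest (by intro q hq; cases hq; omega)
            simp [pvStream, pvMarks, h3, take_snoc S.toList p i ')' hpi hc]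
            simpa using this
      · cases st with
        | none =>
          have := ih (i + 1) depth none hrest (by intro p hp; cases hp)
          simp [pvStream, pvMarks, h1, h2]
          simpa using this
        | some p =>
          have hpi := hst p rfl
          have := ih (i + 1) depth (some p) hrest (by intro q hq; cases hq; omega)
          simp [pvStream, pvMarks, h1, h2, take_snoc S.toList p i c hpi hc]
          simpa using this

-- ===== VERDICT (by name: the statement is the Claim_ definition above) =====
theorem strings_in_max_depth_spec : Claim_equal_strings_in_max_depth := by
  intro S _
  unfold Spec_strings_in_max_depth strings_in_max_depth strings_in_max_depth_alt
  by_cases hinf : "(".toList <:+: S.toList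
  · have hf : PySem.Str.find S "(" ≠ -1 := by
      simpa [PySem.Chars.find_ne_neg_one_iff] using hinf
    have h2 : PySem.Str.isIn "(" S = true := by
      simpa [PySem.Chars.isIn_iff_infix] using hinf
    have hmem : '(' ∈ S.toList := hinf.subset (by simp)
    rw [if_pos hf, h2, if_neg (by simp)]
    -- the two maxima agree
    have hmax : pvMaxD S.toList 0 none
        = some (pvMaxValue (pvStrToLst S.toList 0)) := by
      rw [pvMaxD_eq_fold S.toList 0 0 none]
      unfold pvMaxValue
      rw [pvInts_eq_marks_snd S.toList 0 0]
      cases hm : (pvMarks S.toList 0 0).map (·.2) with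
      | nil =>
        exact absurd (List.map_eq_nil_iff.mp hm) (pvMarks_ne_nil S.toList 0 0 hmem)
      | cons x xs =>
        rw [List.foldl_cons]
        have hx : pvOptMax none x = x := rfl
        rw [hx, fold_optMax]
        rfl
    rw [hmax]
    have := pvStream_spec S (pvMaxValue (pvStrToLst S.toList 0)) S.toList 0 0 none
      (by simp) (by intro p hp; cases hp)
    simp at this
    rw [pvLocate_eq_filter S.toList _ 0 0]
    exact this.symm
  · have hf : ¬ (PySem.Str.find S "(" ≠ -1) := by
      simpa [PySem.Chars.find_eq_neg_one_iff] using hinf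
    have h2 : PySem.Str.isIn "(" S = false := by
      simpa [PySem.Chars.isIn_eq_false_iff] using hinf
    rw [if_neg hf, h2, if_pos rfl]
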